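-- pv_equiv track=rewrite | github.com/GscutiC/apptc | src/backend/application/dto/interface_config_dto.py | complete_color_shades
-- ===== SOURCE A (Python) =====
-- from typing import Optional, Dict, Any, List
--
-- def complete_color_shades(color_dict: Dict[str, str]) -> Dict[str, str]:
--     """
--     Completa los tonos de color faltantes interpolando o usando valores por defecto.
--     Esto permite que configuraciones guardadas con menos tonos sigan funcionando.
--     """
--     # Colores base por defecto (gris neutro)
--     default_shades = {
--         '50': '#f9fafb', '100': '#f3f4f6', '200': '#e5e7eb',
--         '300': '#d1d5db', '400': '#9ca3af', '500': '#6b7280',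
--         '600': '#4b5563', '700': '#374151', '800': '#1f2937', '900': '#111827'
--     }
--
--     required_shades = ['50', '100', '200', '300', '400', '500', '600', '700', '800', '900']
--     completed = {}
--
--     # Encontrar el color base (preferiblemente 500)
--     base_color = color_dict.get('500', color_dict.get('600', color_dict.get('700', '#6b7280')))
--
--     for shade in required_shades:
--         if shade in color_dict:
--             completed[shade] = color_dict[shade]
--         else:
--             # Usar el default o intentar derivar del color base
--             completed[shade] = default_shades.get(shade, base_color)
--
--     return completed
-- ===== SOURCE B (Python) =====
-- from typing import Dict
--
-- def complete_color_shades(color_dict: Dict[str, str]) -> Dict[str, str]: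
--     # Positional-array algorithm: ten slots pre-filled with the default hex
--     # values, a shade->position index, one pass over the caller's entries
--     # writing each recognised shade into its slot, then zip the result.
--     shades = ['50', '100', '200', '300', '400', '500', '600', '700', '800', '900']
--     slots = ['#f9fafb', '#f3f4f6', '#e5e7eb', '#d1d5db', '#9ca3af',
--              '#6b7280', '#4b5563', '#374151', '#1f2937', '#111827']
--     index = {s: i for i, s in enumerate(shades)}
--     for k, v in color_dict.items():
--         i = index.get(k)
--         if i is not None:
--             slots[i] = v
--     return dict(zip(shades, slots))
-- ===== Notes on version B (the rewrite author's own statement) =====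
-- stated objective: alternative
-- what changed: B replaces A's per-shade loop with dict lookups (and the dead base_color fallback) by a positional-array algorithm: a 10-slot array pre-filled with the default values, a shade-to-position index, a single pass over the caller's entries writing recognised shades into their slot, and a final zip; no per-shade membership tests or merge of dicts.
import Mathlib
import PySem

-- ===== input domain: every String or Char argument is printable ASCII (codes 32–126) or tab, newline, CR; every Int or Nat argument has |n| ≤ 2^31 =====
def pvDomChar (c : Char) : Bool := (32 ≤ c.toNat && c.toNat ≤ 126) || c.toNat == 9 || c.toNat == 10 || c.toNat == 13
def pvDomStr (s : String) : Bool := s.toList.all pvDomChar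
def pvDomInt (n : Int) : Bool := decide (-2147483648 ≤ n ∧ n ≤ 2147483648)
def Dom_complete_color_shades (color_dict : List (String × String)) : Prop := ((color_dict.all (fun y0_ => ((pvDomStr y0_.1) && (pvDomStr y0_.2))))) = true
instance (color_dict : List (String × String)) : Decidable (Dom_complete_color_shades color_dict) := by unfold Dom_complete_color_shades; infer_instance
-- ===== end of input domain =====

-- B replaces A's per-shade loop with dict lookups (and the dead base_color
-- fallback) by a positional-array algorithm: a 10-slot array pre-filled with
-- the defaults, a shade->position index, one pass over the caller's entries
-- writing into slots, then a final zip; same result, different data layout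
-- and traversal.

-- ===== PORT A =====
def ccsDefaults : PySem.Dict String String := PySem.Dict.mk
  [("50", "#f9fafb"), ("100", "#f3f4f6"), ("200", "#e5e7eb"),
   ("300", "#d1d5db"), ("400", "#9ca3af"), ("500", "#6b7280"),
   ("600", "#4b5563"), ("700", "#374151"), ("800", "#1f2937"), ("900", "#111827")]

def ccsRequiredA : List String :=
  ["50", "100", "200", "300", "400", "500", "600", "700", "800", "900"]

def complete_color_shades (color_dict : List (String × String)) : List (String × String) :=
  let cd : PySem.Dict String String := PySem.Dict.ofList color_dict
  let base_color : String := cd.getD "500" (cd.getD "600" (cd.getD "700" "#6b7280"))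
  let completed : PySem.Dict String String :=
    ccsRequiredA.foldl (fun c shade =>
      if cd.contains shade then
        c.insert shade ((cd.get? shade).getD "")   -- color_dict[shade]; guarded by the contains test
      else
        c.insert shade (ccsDefaults.getD shade base_color)) PySem.Dict.empty
  completed.items

-- ===== PORT B =====
def ccsShades : List String :=
  ["50", "100", "200", "300", "400", "500", "600", "700", "800", "900"]

def ccsSlots0 : List String :=
  ["#f9fafb", "#f3f4f6", "#e5e7eb", "#d1d5db", "#9ca3af",
   "#6b7280", "#4b5563", "#374151", "#1f2937", "#111827"]

-- index = {s: i for i, s in enumerate(shades)}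
def ccsIndex : PySem.Dict String Int :=
  (PySem.List.enumerate ccsShades).foldl (fun d p => d.insert p.2 p.1) PySem.Dict.empty

def complete_color_shades_alt (color_dict : List (String × String)) : List (String × String) :=
  let cd : PySem.Dict String String := PySem.Dict.ofList color_dict
  let slots : List String :=
    cd.items.foldl (fun slots p =>
      match ccsIndex.get? p.1 with
      | some i => slots.set i.toNat p.2   -- slots[i] = v; i is always one of 0..9, so in-range and non-negative: set is exact here
      | none => slots) ccsSlots0
  (PySem.Dict.ofList (ccsShades.zip slots)).items   -- dict(zip(shades, slots))

-- ===== PRECONDITION & SPEC =====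
def Spec_complete_color_shades (color_dict : List (String × String)) (out : List (String × String)) : Prop := out = complete_color_shades_alt color_dict
instance (color_dict : List (String × String)) (out : List (String × String)) : Decidable (Spec_complete_color_shades color_dict out) := by unfold Spec_complete_color_shades; infer_instance

-- ===== CLAIM (what is proved, stated in full; the proofs are below) =====
def Claim_equal_complete_color_shades : Prop := ∀ (color_dict : List (String × String)), Dom_complete_color_shades color_dict → Spec_complete_color_shades color_dict (complete_color_shades color_dict)

-- ===== LEMMAS AND PROOFS =====

-- the B-side loop body, named for the proofs
def ccsStep (slots : List String) (p : String × String) : List String :=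
  match ccsIndex.get? p.1 with
  | some i => slots.set i.toNat p.2
  | none => slots

lemma ccsIndex_spec (k : String) (j : Int) (h : ccsIndex.get? k = some j) :
    ∃ n : Nat, j = (n : Int) ∧ n < 10 ∧ ccsShades.getD n "" = k := by
  have e : ccsIndex = PySem.Dict.mk [("50",0),("100",1),("200",2),("300",3),("400",4),("500",5),("600",6),("700",7),("800",8),("900",9)] := by rfl
  rw [e] at h
  simp only [PySem.Dict.get?_mk_cons, beq_iff_eq] at h
  split_ifs at h with h1 h2 h3 h4 h5 h6 h7 h8 h9 h10
  · exact ⟨0, by simpa using (Option.some.inj h).symm, by norm_num, by simpa using h1⟩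
  · exact ⟨1, by simpa using (Option.some.inj h).symm, by norm_num, by simpa using h2⟩
  · exact ⟨2, by simpa using (Option.some.inj h).symm, by norm_num, by simpa using h3⟩
  · exact ⟨3, by simpa using (Option.some.inj h).symm, by norm_num, by simpa using h4⟩
  · exact ⟨4, by simpa using (Option.some.inj h).symm, by norm_num, by simpa using h5⟩
  · exact ⟨5, by simpa using (Option.some.inj h).symm, by norm_num, by simpa using h6⟩
  · exact ⟨6, by simpa using (Option.some.inj h).symm, by norm_num, by simpa using h7⟩
  · exact ⟨7, by simpa using (Option.some.inj h).symm, by norm_num, by simpa using h8⟩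
  · exact ⟨8, by simpa using (Option.some.inj h).symm, by norm_num, by simpa using h9⟩
  · exact ⟨9, by simpa using (Option.some.inj h).symm, by norm_num, by simpa using h10⟩
  · rw [show (PySem.Dict.mk ([] : List (String × Int))).get? k = none from rfl] at h
    cases h

lemma ccsIndex_shade (n : Nat) (hn : n < 10) :
    ccsIndex.get? (ccsShades.getD n "") = some (n : Int) := by
  interval_cases n <;> decide

lemma ccsStep_length (slots : List String) (p : String × String) :
    (ccsStep slots p).length = slots.length := by
  unfold ccsStep; cases ccsIndex.get? p.1 <;> simp

lemma fold_step_length (l : List (String × String)) (slots : List String) :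
    (l.foldl ccsStep slots).length = slots.length := by
  induction l generalizing slots with
  | nil => rfl
  | cons p rest ih => rw [List.foldl_cons, ih, ccsStep_length]

lemma fold_step_get (l : List (String × String)) (slots : List String)
    (hnd : (l.map Prod.fst).Nodup) (hlen : slots.length = 10) (n : Nat) (hn : n < 10) :
    (l.foldl ccsStep slots)[n]? =
      match (PySem.Dict.mk l).get? (ccsShades.getD n "") with
      | some v => some v
      | none => slots[n]? := by
  induction l generalizing slots with
  | nil =>
      rw [show (PySem.Dict.mk ([] : List (String × String))).get? (ccsShades.getD n "") = none from rfl]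
      rfl
  | cons p rest ih =>
      simp only [List.map_cons, List.nodup_cons] at hnd
      rw [List.foldl_cons, ih (ccsStep slots p) hnd.2 (by rw [ccsStep_length]; exact hlen),
        PySem.Dict.get?_mk_cons]
      by_cases hk : p.1 = ccsShades.getD n ""
      · have hstep : ccsStep slots p = slots.set n p.2 := by
          unfold ccsStep; rw [hk, ccsIndex_shade n hn]; simp
        have hnone : (PySem.Dict.mk rest).get? (ccsShades.getD n "") = none := by
          rw [PySem.Dict.get?_eq_none_iff_not_mem_keys]
          rw [hk] at hnd
          simpa [PySem.Dict.keys] using hnd.1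
        rw [hnone, hstep]
        simp only [hk, beq_self_eq_true, if_true]
        rw [List.getElem?_set_self (by omega)]
      · have hbeq : (p.1 == ccsShades.getD n "") = false := by simpa using hk
        rw [hbeq]
        simp only [Bool.false_eq_true, if_false]
        cases hrest : (PySem.Dict.mk rest).get? (ccsShades.getD n "") with
        | some v => rfl
        | none =>
            show (ccsStep slots p)[n]? = slots[n]?
            unfold ccsStep
            cases hidx : ccsIndex.get? p.1 with
            | none => rfl
            | some j =>
                obtain ⟨m, hj, hm10, hms⟩ := ccsIndex_spec p.1 j hidx
                have hmn : m ≠ n := fun hmn => hk (by rw [← hms, hmn])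
                simp only [hj, Int.toNat_natCast]
                rw [List.getElem?_set_ne hmn]

-- ===== VERDICT (by name: the statement is the Claim_ definition above) =====
theorem complete_color_shades_spec : Claim_equal_complete_color_shades := by
  intro color_dict _
  unfold Spec_complete_color_shades complete_color_shades complete_color_shades_alt
  dsimp only
  set cd := PySem.Dict.ofList color_dict with hcd
  set base := cd.getD "500" (cd.getD "600" (cd.getD "700" "#6b7280")) with hbase
  -- A's loop over fresh distinct keys appends its 10 items
  have hA : (ccsRequiredA.foldl (fun c shade =>
      if cd.contains shade then c.insert shade ((cd.get? shade).getD "")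
      else c.insert shade (ccsDefaults.getD shade base)) PySem.Dict.empty).items
      = ccsRequiredA.map (fun s => (s, if cd.contains s then (cd.get? s).getD ""
          else ccsDefaults.getD s base)) := by
    have hfun : (fun (c : PySem.Dict String String) (shade : String) =>
        if cd.contains shade then c.insert shade ((cd.get? shade).getD "")
        else c.insert shade (ccsDefaults.getD shade base))
        = (fun c shade => c.insert shade (if cd.contains shade then (cd.get? shade).getD ""
            else ccsDefaults.getD shade base)) := by
      funext c s; split <;> rfl
    rw [hfun]
    have := PySem.Dict.items_foldl_insert_fresh (l := ccsRequiredA) (k := id)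
      (v := fun s => if cd.contains s then (cd.get? s).getD "" else ccsDefaults.getD s base)
      (d := PySem.Dict.empty) (by decide) (by decide)
    simpa using this
  rw [hA]
  -- B's loop is ccsStep folded over cd.items
  rw [show (fun (slots : List String) (p : String × String) =>
      match ccsIndex.get? p.1 with
      | some i => slots.set i.toNat p.2
      | none => slots) = ccsStep from rfl]
  set slots' := cd.items.foldl ccsStep ccsSlots0 with hslots
  have hlen' : slots'.length = 10 := by
    rw [hslots, fold_step_length]; rfl
  -- dict(zip(...)): the ten shade keys are fresh and distinct, so items = the zip
  have hBitems : (PySem.Dict.ofList (ccsShades.zip slots')).items = ccsShades.zip slots' := by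
    have hfst : (ccsShades.zip slots').map Prod.fst = ccsShades :=
      List.map_fst_zip (by rw [hlen']; decide)
    have := PySem.Dict.items_foldl_insert_fresh (l := ccsShades.zip slots')
      (k := Prod.fst) (v := Prod.snd) (d := PySem.Dict.empty)
      (by intro a _; rfl) (by rw [hfst]; decide)
    simpa using this
  rw [hBitems]
  -- nodup keys of cd
  have hnd : (cd.items.map Prod.fst).Nodup := by
    have := PySem.Dict.nodup_keys_ofList (κ := String) (ν := String) color_dict
    simpa [PySem.Dict.keys] using this
  -- elementwise equality
  apply List.ext_getElem
  · simp [hlen']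
    decide
  · intro i hi1 hi2
    have hi : i < 10 := by simpa using hi1
    rw [List.getElem_map, List.getElem_zip]
    have hshade : ccsShades.getD i "" = ccsRequiredA[i] := by
      rw [List.getD_eq_getElem?_getD, List.getElem?_eq_getElem (by simpa using hi)]
      rfl
    have hget := fold_step_get cd.items ccsSlots0 hnd rfl i hi
    rw [show PySem.Dict.mk cd.items = cd from rfl, hshade] at hget
    rw [← hslots] at hget
    refine Prod.ext (by dsimp only; rfl) ?_
    dsimp only
    have h1 : slots'[i]? = some (slots'[i]'(by omega)) := List.getElem?_eq_getElem (by omega)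
    cases hq : cd.get? ccsRequiredA[i] with
    | some v =>
        rw [hq, h1] at hget
        split_ifs with hc
        · exact (Option.some.inj hget).symm
        · rw [PySem.Dict.contains_eq_isSome_get?] at hc
          exact absurd (congrArg Option.isSome hq) hc
    | none =>
        rw [hq, h1] at hget
        have h2 : ccsSlots0[i]? = some (ccsSlots0.getD i "") := by
          rw [List.getD_eq_getElem?_getD, List.getElem?_eq_getElem (by simpa using hi)]
          rfl
        rw [h2] at hget
        split_ifs with hc
        · rw [PySem.Dict.contains_eq_isSome_get?] at hc
          exact absurd ((congrArg Option.isSome hq).symm.trans hc) (by decide)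
        · have hsome : ccsDefaults.get? ccsRequiredA[i] = some (ccsSlots0.getD i "") := by
            interval_cases i <;> rfl
          exact (PySem.Dict.getD_of_get?_eq_some _ _ hsome).trans (Option.some.inj hget).symm
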